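-- pv_equiv track=rewrite | github.com/Cocoyol/CalculadoraPy | formula_evaluator.py | _replace_factorial
-- ===== SOURCE A (Python) =====
-- def _replace_factorial(expr: str) -> str:
--     chars = list(expr)
--     i = len(chars) - 1
--
--     while i >= 0:
--         if chars[i] != "!":
--             i -= 1
--             continue
--
--         j = i - 1
--
--         if j >= 0 and chars[j] == ")":
--             depth = 1
--             j -= 1
--             while j >= 0 and depth > 0:
--                 if chars[j] == ")":
--                     depth += 1
--                 elif chars[j] == "(":
--                     depth -= 1
--                 j -= 1
--             j += 1
--             operand = "".join(chars[j:i])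
--             chars[j : i + 1] = list(f"factorial({operand})")
--             i = j - 1
--             continue
--
--         if j >= 0 and (chars[j].isdigit() or chars[j] == "."):
--             start = j
--             while start > 0 and (
--                 chars[start - 1].isdigit() or chars[start - 1] == "."
--             ):
--                 start -= 1
--             operand = "".join(chars[start:i])
--             chars[start : i + 1] = list(f"factorial({operand})")
--             i = start - 1
--             continue
--
--         if j >= 0 and (chars[j].isalpha() or chars[j] == "π"):
--             start = j
--             while start > 0 and (chars[start - 1].isalpha() or chars[start - 1] == "π"):
--                 start -= 1
--             operand = "".join(chars[start:i])
--             chars[start : i + 1] = list(f"factorial({operand})")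
--             i = start - 1
--             continue
--
--         i -= 1
--
--     return "".join(chars)
-- ===== SOURCE B (Python) =====
-- def _operand_start(expr: str, i: int):
--     """Start index of the operand of the '!' at index i, or None if the '!' has none."""
--     j = i - 1
--     if j < 0:
--         return None
--     c = expr[j]
--     if c == ")":
--         depth = 1
--         k = j - 1
--         while k >= 0 and depth > 0:
--             if expr[k] == ")":
--                 depth += 1
--             elif expr[k] == "(":
--                 depth -= 1
--             k -= 1
--         return k + 1
--     if c.isdigit() or c == ".":
--         s = j
--         while s > 0 and (expr[s - 1].isdigit() or expr[s - 1] == "."):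
--             s -= 1
--         return s
--     if c.isalpha() or c == "π":
--         s = j
--         while s > 0 and (expr[s - 1].isalpha() or expr[s - 1] == "π"):
--             s -= 1
--         return s
--     return None
--
--
-- def _replace_factorial(expr: str) -> str:
--     segs = []  # output pieces collected right-to-left; joined once at the end
--     i = len(expr) - 1
--     while i >= 0:
--         if expr[i] != "!":
--             segs.append(expr[i])
--             i -= 1
--             continue
--         s = _operand_start(expr, i)
--         if s is None:
--             segs.append("!")
--             i -= 1
--         else:
--             segs.append("factorial(" + expr[s:i] + ")")
--             i = s - 1
--     return "".join(reversed(segs))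
-- ===== Notes on version B (the rewrite author's own statement) =====
-- stated objective: alternative
-- what changed: B makes a single right-to-left pass that emits output segments (operand spans found once, segments reversed and joined once at the end) instead of A's in-place list splicing chars[j:i+1] = list(...) which rewrites the character list on every factorial-suffix replacement; B never mutates a char list and avoids the tail copies splicing does on replacement-heavy input.
import Mathlib
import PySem

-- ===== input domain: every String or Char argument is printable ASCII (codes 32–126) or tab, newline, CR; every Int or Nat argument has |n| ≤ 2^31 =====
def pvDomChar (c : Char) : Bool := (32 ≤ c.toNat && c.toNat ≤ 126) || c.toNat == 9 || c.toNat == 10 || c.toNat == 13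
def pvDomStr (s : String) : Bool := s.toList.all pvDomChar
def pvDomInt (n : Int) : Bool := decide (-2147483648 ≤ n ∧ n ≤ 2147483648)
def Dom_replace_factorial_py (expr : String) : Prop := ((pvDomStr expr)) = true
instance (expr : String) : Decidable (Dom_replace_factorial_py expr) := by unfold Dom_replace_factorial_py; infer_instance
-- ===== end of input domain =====

-- B rewrites factorial-suffix operators in one right-to-left pass emitting output segments joined once,
-- instead of A's repeated in-place list splicing (objective: alternative).
-- Loops are ported as structural recursion on a fuel argument that is always large enough
-- (a totality guard only; it never changes the computed value).

-- chars[k] for an index the loops always keep in range (exact there: pyGet? is Python indexing)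
def pvGet (cs : List Char) (i : Int) : Char := (PySem.List.pyGet? cs i).getD ' '

-- the inner `while j >= 0 and depth > 0` paren-matching loop (identical in Source A and Source B);
-- fuel ≥ k+1 suffices: k drops by 1 each pass, and at k < 0 the guard stops the loop anyway
def pvParenScan (cs : List Char) : Nat → Int → Int → Int
  | 0, k, _ => k
  | fuel + 1, k, depth =>
    if 0 ≤ k ∧ 0 < depth then
      pvParenScan cs fuel (k - 1)
        (if pvGet cs k = ')' then depth + 1
         else if pvGet cs k = '(' then depth - 1 else depth)
    else k

-- the inner `while start > 0 and pred(chars[start-1])` run loops (identical in Source A and Source B)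
def pvRunScan (pred : Char → Bool) (cs : List Char) : Nat → Int → Int
  | 0, s => s
  | fuel + 1, s =>
    if 0 < s ∧ pred (pvGet cs (s - 1)) then pvRunScan pred cs fuel (s - 1) else s

def pvDigitDot (c : Char) : Bool := PySem.Chars.isdigit c || c = '.'
def pvAlphaPi (c : Char) : Bool := PySem.Chars.isalpha c || c = 'π'

-- ===== PORT A =====
-- the main `while i >= 0` loop of Source A, splicing `chars` in place
def pvLoopA : List Char → Nat → Int → List Char
  | chars, 0, _ => chars
  | chars, fuel + 1, i =>
    if i < 0 then chars
    else if pvGet chars i ≠ '!' then pvLoopA chars fuel (i - 1)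
    else if 0 ≤ i - 1 ∧ pvGet chars (i - 1) = ')' then
      let j2 := pvParenScan chars (i - 1).toNat (i - 1 - 1) 1 + 1
      pvLoopA (PySem.List.slice chars (some 0) (some j2) ++
               ("factorial(".toList ++ PySem.List.slice chars (some j2) (some i) ++ [')']) ++
               PySem.List.slice chars (some (i + 1)) none) fuel (j2 - 1)
    else if 0 ≤ i - 1 ∧ pvDigitDot (pvGet chars (i - 1)) then
      let s := pvRunScan pvDigitDot chars (i - 1).toNat (i - 1)
      pvLoopA (PySem.List.slice chars (some 0) (some s) ++
               ("factorial(".toList ++ PySem.List.slice chars (some s) (some i) ++ [')']) ++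
               PySem.List.slice chars (some (i + 1)) none) fuel (s - 1)
    else if 0 ≤ i - 1 ∧ pvAlphaPi (pvGet chars (i - 1)) then
      let s := pvRunScan pvAlphaPi chars (i - 1).toNat (i - 1)
      pvLoopA (PySem.List.slice chars (some 0) (some s) ++
               ("factorial(".toList ++ PySem.List.slice chars (some s) (some i) ++ [')']) ++
               PySem.List.slice chars (some (i + 1)) none) fuel (s - 1)
    else pvLoopA chars fuel (i - 1)

def replace_factorial_py (expr : String) : String :=
  String.ofList (pvLoopA expr.toList expr.toList.length ((expr.toList.length : Int) - 1))

-- ===== PORT B =====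
-- _operand_start from Source B: start index of the operand of the '!' at i, none if it has no operand
def pvOperandStart (expr : List Char) (i : Int) : Option Int :=
  if i - 1 < 0 then none
  else if pvGet expr (i - 1) = ')' then some (pvParenScan expr (i - 1).toNat (i - 1 - 1) 1 + 1)
  else if pvDigitDot (pvGet expr (i - 1)) then some (pvRunScan pvDigitDot expr (i - 1).toNat (i - 1))
  else if pvAlphaPi (pvGet expr (i - 1)) then some (pvRunScan pvAlphaPi expr (i - 1).toNat (i - 1))
  else none

-- Source B's main loop: collect output segments right-to-left
def pvLoopB (expr : List Char) : Nat → Int → List (List Char) → List (List Char)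
  | 0, _, segs => segs
  | fuel + 1, i, segs =>
    if i < 0 then segs
    else if pvGet expr i ≠ '!' then pvLoopB expr fuel (i - 1) (segs ++ [[pvGet expr i]])
    else
      match pvOperandStart expr i with
      | none => pvLoopB expr fuel (i - 1) (segs ++ [['!']])
      | some s =>
          pvLoopB expr fuel (s - 1)
            (segs ++ [("factorial(".toList ++ PySem.List.slice expr (some s) (some i) ++ [')'])])

def replace_factorial_py_alt (expr : String) : String :=
  String.ofList ((pvLoopB expr.toList expr.toList.length ((expr.toList.length : Int) - 1) []).reverse.flatten)

-- ===== PRECONDITION & SPEC =====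
def Spec_replace_factorial_py (expr : String) (out : String) : Prop := out = replace_factorial_py_alt expr
instance (expr : String) (out : String) : Decidable (Spec_replace_factorial_py expr out) := by unfold Spec_replace_factorial_py; infer_instance

-- ===== CLAIM (what is proved, stated in full; the proofs are below) =====
def Claim_equal_replace_factorial_py : Prop := ∀ (expr : String), Dom_replace_factorial_py expr → Spec_replace_factorial_py expr (replace_factorial_py expr)

-- ===== LEMMAS AND PROOFS =====

theorem pvParenScan_le (cs : List Char) :
    ∀ (fuel : Nat) (k d : Int), pvParenScan cs fuel k d ≤ k := by
  intro fuel
  induction fuel with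
  | zero => intro k d; exact le_refl k
  | succ f ih =>
      intro k d
      rw [pvParenScan]
      by_cases h : 0 ≤ k ∧ 0 < d
      · rw [if_pos h]
        have := ih (k - 1) (if pvGet cs k = ')' then d + 1 else if pvGet cs k = '(' then d - 1 else d)
        omega
      · rw [if_neg h]

theorem pvParenScan_ge (cs : List Char) :
    ∀ (fuel : Nat) (k d : Int), -1 ≤ k → -1 ≤ pvParenScan cs fuel k d := by
  intro fuel
  induction fuel with
  | zero => intro k d h; exact h
  | succ f ih =>
      intro k d h
      rw [pvParenScan]
      by_cases h1 : 0 ≤ k ∧ 0 < d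
      · rw [if_pos h1]
        exact ih (k - 1) _ (by omega)
      · rw [if_neg h1]
        exact h

theorem pvRunScan_le (pred : Char → Bool) (cs : List Char) :
    ∀ (fuel : Nat) (s : Int), pvRunScan pred cs fuel s ≤ s := by
  intro fuel
  induction fuel with
  | zero => intro s; exact le_refl s
  | succ f ih =>
      intro s
      rw [pvRunScan]
      by_cases h : 0 < s ∧ pred (pvGet cs (s - 1))
      · rw [if_pos h]
        have := ih (s - 1); omega
      · rw [if_neg h]

theorem pvRunScan_nonneg (pred : Char → Bool) (cs : List Char) :
    ∀ (fuel : Nat) (s : Int), 0 ≤ s → 0 ≤ pvRunScan pred cs fuel s := by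
  intro fuel
  induction fuel with
  | zero => intro s h; exact h
  | succ f ih =>
      intro s h
      rw [pvRunScan]
      by_cases h1 : 0 < s ∧ pred (pvGet cs (s - 1))
      · rw [if_pos h1]
        exact ih (s - 1) (by omega)
      · rw [if_neg h1]
        exact h

theorem pvOperandStart_le (expr : List Char) (i s : Int)
    (h : pvOperandStart expr i = some s) : s ≤ i - 1 := by
  unfold pvOperandStart at h
  split_ifs at h with h1 h2 h3 h4 <;> injection h with h <;> subst h
  · have := pvParenScan_le expr (i - 1).toNat (i - 1 - 1) 1; omega
  · exact pvRunScan_le _ expr (i - 1).toNat (i - 1)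
  · exact pvRunScan_le _ expr (i - 1).toNat (i - 1)

theorem pvOperandStart_nonneg (expr : List Char) (i s : Int)
    (h : pvOperandStart expr i = some s) : 0 ≤ s := by
  unfold pvOperandStart at h
  split_ifs at h with h1 h2 h3 h4 <;> injection h with h <;> subst h
  · have := pvParenScan_ge expr (i - 1).toNat (i - 1 - 1) 1 (by omega); omega
  · exact pvRunScan_nonneg _ expr (i - 1).toNat (i - 1) (by omega)
  · exact pvRunScan_nonneg _ expr (i - 1).toNat (i - 1) (by omega)

-- B's result as a function of expr and the loop index, with its canonical fuel
def pvF (e : List Char) (i : Int) : List Char := (pvLoopB e (i + 1).toNat i []).reverse.flatten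

theorem pvGet_eq (e : List Char) (i : Int) (h0 : 0 ≤ i) (h1 : i < (e.length : Int)) :
    pvGet e i = e[i.toNat]'(by omega) := by
  unfold pvGet
  rw [PySem.List.pyGet?_of_nonneg e h0, List.getElem?_eq_getElem (by omega)]
  rfl

theorem pvSlice_eq (l : List Char) (s i : Int) (h0 : 0 ≤ s) (h1 : s ≤ i) :
    PySem.List.slice l (some s) (some i) = (l.take i.toNat).drop s.toNat := by
  have hs : s = ((s.toNat : Nat) : Int) := by omega
  have hi : i = ((i.toNat : Nat) : Int) := by omega
  rw [hs, hi, PySem.List.slice_natCast, List.drop_take]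
  congr 2

-- equation lemmas for one step of pvLoopB
theorem pvLoopB_eq_neg (e : List Char) (i : Int) (segs : List (List Char)) (h0 : i < 0) :
    ∀ fuel : Nat, pvLoopB e fuel i segs = segs := by
  intro fuel
  cases fuel with
  | zero => rfl
  | succ f => rw [pvLoopB, if_pos h0]

theorem pvLoopB_eq_char (e : List Char) (fuel : Nat) (i : Int) (segs : List (List Char))
    (h0 : ¬ i < 0) (hc : pvGet e i ≠ '!') :
    pvLoopB e (fuel + 1) i segs = pvLoopB e fuel (i - 1) (segs ++ [[pvGet e i]]) := by
  rw [pvLoopB, if_neg h0, if_pos hc]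

theorem pvLoopB_eq_none (e : List Char) (fuel : Nat) (i : Int) (segs : List (List Char))
    (h0 : ¬ i < 0) (hc : pvGet e i = '!') (hos : pvOperandStart e i = none) :
    pvLoopB e (fuel + 1) i segs = pvLoopB e fuel (i - 1) (segs ++ [['!']]) := by
  rw [pvLoopB, if_neg h0, if_neg (by simp [hc]), hos]

theorem pvLoopB_eq_some (e : List Char) (fuel : Nat) (i s : Int) (segs : List (List Char))
    (h0 : ¬ i < 0) (hc : pvGet e i = '!') (hos : pvOperandStart e i = some s) :
    pvLoopB e (fuel + 1) i segs = pvLoopB e fuel (s - 1)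
      (segs ++ [("factorial(".toList ++ PySem.List.slice e (some s) (some i) ++ [')'])]) := by
  rw [pvLoopB, if_neg h0, if_neg (by simp [hc]), hos]

-- the fuel is irrelevant once it dominates the index
theorem pvLoopB_fuel (e : List Char) :
    ∀ (fuel fuel' : Nat) (i : Int) (segs : List (List Char)),
      (i + 1).toNat ≤ fuel → (i + 1).toNat ≤ fuel' →
      pvLoopB e fuel i segs = pvLoopB e fuel' i segs := by
  intro fuel
  induction fuel with
  | zero =>
      intro fuel' i segs h h'
      rw [pvLoopB_eq_neg e i segs (by omega), pvLoopB_eq_neg e i segs (by omega)]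
  | succ f ih =>
      intro fuel' i segs h h'
      by_cases h0 : i < 0
      · rw [pvLoopB_eq_neg e i segs h0, pvLoopB_eq_neg e i segs h0]
      · cases fuel' with
        | zero => omega
        | succ f' =>
            by_cases hc : pvGet e i = '!'
            · cases hos : pvOperandStart e i with
              | none =>
                  rw [pvLoopB_eq_none e f i segs h0 hc hos,
                      pvLoopB_eq_none e f' i segs h0 hc hos]
                  exact ih f' (i - 1) _ (by omega) (by omega)
              | some s =>
                  have hs := pvOperandStart_le e i s hos
                  rw [pvLoopB_eq_some e f i s segs h0 hc hos,
                      pvLoopB_eq_some e f' i s segs h0 hc hos]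
                  exact ih f' (s - 1) _ (by omega) (by omega)
            · rw [pvLoopB_eq_char e f i segs h0 hc, pvLoopB_eq_char e f' i segs h0 hc]
              exact ih f' (i - 1) _ (by omega) (by omega)

-- pvLoopB is a pure accumulator loop
theorem pvLoopB_prepend (e : List Char) :
    ∀ (fuel : Nat) (i : Int) (segs a : List (List Char)),
      pvLoopB e fuel i (a ++ segs) = a ++ pvLoopB e fuel i segs := by
  intro fuel
  induction fuel with
  | zero => intro i segs a; rfl
  | succ f ih =>
      intro i segs a
      by_cases h0 : i < 0
      · rw [pvLoopB_eq_neg e i _ h0, pvLoopB_eq_neg e i _ h0]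
      · by_cases hc : pvGet e i = '!'
        · cases hos : pvOperandStart e i with
          | none =>
              rw [pvLoopB_eq_none e f i _ h0 hc hos, pvLoopB_eq_none e f i _ h0 hc hos,
                  List.append_assoc]
              exact ih (i - 1) _ a
          | some s =>
              rw [pvLoopB_eq_some e f i s _ h0 hc hos, pvLoopB_eq_some e f i s _ h0 hc hos,
                  List.append_assoc]
              exact ih (s - 1) _ a
        · rw [pvLoopB_eq_char e f i _ h0 hc, pvLoopB_eq_char e f i _ h0 hc, List.append_assoc]
          exact ih (i - 1) _ a

theorem pvLoopB_acc (e : List Char) (fuel : Nat) (i : Int) (segs : List (List Char)) :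
    pvLoopB e fuel i segs = segs ++ pvLoopB e fuel i [] := by
  have := pvLoopB_prepend e fuel i [] segs
  simpa using this

theorem pvF_neg (e : List Char) (i : Int) (h0 : i < 0) : pvF e i = [] := by
  unfold pvF
  rw [pvLoopB_eq_neg e i [] h0]
  rfl

theorem pvF_step_char (e : List Char) (i : Int) (h0 : ¬ i < 0) (hc : pvGet e i ≠ '!') :
    pvF e i = pvF e (i - 1) ++ [pvGet e i] := by
  unfold pvF
  rw [show (i + 1).toNat = (i - 1 + 1).toNat + 1 by omega,
      pvLoopB_eq_char e (i - 1 + 1).toNat i [] h0 hc, pvLoopB_acc]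
  simp

theorem pvF_step_none (e : List Char) (i : Int) (h0 : ¬ i < 0) (hc : pvGet e i = '!')
    (hos : pvOperandStart e i = none) :
    pvF e i = pvF e (i - 1) ++ ['!'] := by
  unfold pvF
  rw [show (i + 1).toNat = (i - 1 + 1).toNat + 1 by omega,
      pvLoopB_eq_none e (i - 1 + 1).toNat i [] h0 hc hos, pvLoopB_acc]
  simp

theorem pvF_step_some (e : List Char) (i s : Int) (h0 : ¬ i < 0) (hc : pvGet e i = '!')
    (hos : pvOperandStart e i = some s) :
    pvF e i = pvF e (s - 1) ++ ("factorial(".toList ++ PySem.List.slice e (some s) (some i) ++ [')']) := by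
  have hs := pvOperandStart_le e i s hos
  unfold pvF
  rw [show (i + 1).toNat = i.toNat + 1 by omega,
      pvLoopB_eq_some e i.toNat i s [] h0 hc hos, pvLoopB_acc,
      pvLoopB_fuel e i.toNat (s - 1 + 1).toNat (s - 1) [] (by omega) (by omega)]
  simp

-- congruence: everything the right-to-left pass reads lies in the prefix before the current index
theorem pvGet_congr (a b : List Char) (m : Nat) (h : a.take m = b.take m)
    (i : Int) (h0 : 0 ≤ i) (hi : i < (m : Int)) : pvGet a i = pvGet b i := by
  unfold pvGet
  rw [PySem.List.pyGet?_of_nonneg a h0, PySem.List.pyGet?_of_nonneg b h0,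
      ← List.getElem?_take_of_lt (l := a) (by omega : i.toNat < m),
      ← List.getElem?_take_of_lt (l := b) (by omega : i.toNat < m), h]

theorem pvParenScan_congr (a b : List Char) (m : Nat) (h : a.take m = b.take m) :
    ∀ (fuel : Nat) (k d : Int), k < (m : Int) → pvParenScan a fuel k d = pvParenScan b fuel k d := by
  intro fuel
  induction fuel with
  | zero => intro k d _; rfl
  | succ f ih =>
      intro k d hm
      by_cases h1 : 0 ≤ k ∧ 0 < d
      · rw [pvParenScan, pvParenScan, if_pos h1, if_pos h1,
            pvGet_congr a b m h k (by omega) hm]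
        exact ih (k - 1) _ (by omega)
      · rw [pvParenScan, pvParenScan, if_neg h1, if_neg h1]

theorem pvRunScan_congr (pred : Char → Bool) (a b : List Char) (m : Nat)
    (h : a.take m = b.take m) :
    ∀ (fuel : Nat) (s : Int), s ≤ (m : Int) → pvRunScan pred a fuel s = pvRunScan pred b fuel s := by
  intro fuel
  induction fuel with
  | zero => intro s _; rfl
  | succ f ih =>
      intro s hm
      by_cases hs : 0 < s
      · have hg : pvGet a (s - 1) = pvGet b (s - 1) :=
          pvGet_congr a b m h (s - 1) (by omega) (by omega)
        by_cases h1 : 0 < s ∧ pred (pvGet b (s - 1))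
        · rw [pvRunScan, pvRunScan, if_pos (by rw [hg]; exact h1), if_pos h1]
          exact ih (s - 1) (by omega)
        · rw [pvRunScan, pvRunScan, if_neg (by rw [hg]; exact h1), if_neg h1]
      · rw [pvRunScan, pvRunScan, if_neg (by intro hh; exact hs hh.1),
            if_neg (by intro hh; exact hs hh.1)]

theorem pvOperandStart_congr (a b : List Char) (m : Nat) (h : a.take m = b.take m)
    (i : Int) (hi : i ≤ (m : Int)) : pvOperandStart a i = pvOperandStart b i := by
  unfold pvOperandStart
  by_cases hj : i - 1 < 0
  · rw [if_pos hj, if_pos hj]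
  · have hg : pvGet a (i - 1) = pvGet b (i - 1) := pvGet_congr a b m h (i - 1) (by omega) (by omega)
    rw [if_neg hj, if_neg hj, hg,
        pvParenScan_congr a b m h (i - 1).toNat (i - 1 - 1) 1 (by omega),
        pvRunScan_congr pvDigitDot a b m h (i - 1).toNat (i - 1) (by omega),
        pvRunScan_congr pvAlphaPi a b m h (i - 1).toNat (i - 1) (by omega)]

theorem pvTake_congr {α : Type} (a b : List α) (m n : Nat) (h : a.take m = b.take m)
    (hn : n ≤ m) : a.take n = b.take n := by
  have := congrArg (List.take n) h
  simpa [List.take_take, min_eq_left hn] using this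

theorem pvSlice_congr (a b : List Char) (m : Nat) (h : a.take m = b.take m)
    (s i : Int) (hs0 : 0 ≤ s) (hsi : s ≤ i) (him : i ≤ (m : Int)) :
    PySem.List.slice a (some s) (some i) = PySem.List.slice b (some s) (some i) := by
  rw [pvSlice_eq a s i hs0 hsi, pvSlice_eq b s i hs0 hsi,
      pvTake_congr a b m i.toNat h (by omega)]

theorem pvLoopB_congr (a b : List Char) (m : Nat) (h : a.take m = b.take m) :
    ∀ (fuel : Nat) (i : Int) (segs : List (List Char)), i < (m : Int) →
      pvLoopB a fuel i segs = pvLoopB b fuel i segs := by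
  intro fuel
  induction fuel with
  | zero => intro i segs _; rfl
  | succ f ih =>
      intro i segs hm
      by_cases h0 : i < 0
      · rw [pvLoopB_eq_neg a i _ h0, pvLoopB_eq_neg b i _ h0]
      · have hg : pvGet a i = pvGet b i := pvGet_congr a b m h i (by omega) hm
        by_cases hc : pvGet a i = '!'
        · cases hos : pvOperandStart a i with
          | none =>
              have ho : pvOperandStart b i = none :=
                (pvOperandStart_congr a b m h i (by omega)) ▸ hos
              rw [pvLoopB_eq_none a f i _ h0 hc hos,
                  pvLoopB_eq_none b f i _ h0 (hg ▸ hc) ho]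
              exact ih (i - 1) _ (by omega)
          | some s =>
              have ho : pvOperandStart b i = some s :=
                (pvOperandStart_congr a b m h i (by omega)) ▸ hos
              have hs0 : 0 ≤ s := pvOperandStart_nonneg a i s hos
              have hsl : s ≤ i - 1 := pvOperandStart_le a i s hos
              rw [pvLoopB_eq_some a f i s _ h0 hc hos,
                  pvLoopB_eq_some b f i s _ h0 (hg ▸ hc) ho,
                  pvSlice_congr a b m h s i hs0 (by omega) (by omega)]
              exact ih (s - 1) _ (by omega)
        · rw [pvLoopB_eq_char a f i _ h0 hc, pvLoopB_eq_char b f i _ h0 (hg ▸ hc), hg]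
          exact ih (i - 1) _ (by omega)

-- one replacement step of A equals one emitted segment of B
theorem pvStep (e : List Char) (i s : Int) (fuel : Nat) (hi0 : 0 ≤ i) (hil : i < (e.length : Int))
    (hs0 : 0 ≤ s) (hs : s ≤ i - 1)
    (hc : pvGet e i = '!')
    (hos : pvOperandStart e i = some s)
    (IH : pvLoopA (PySem.List.slice e (some 0) (some s) ++
            ("factorial(".toList ++ PySem.List.slice e (some s) (some i) ++ [')']) ++
            PySem.List.slice e (some (i + 1)) none) fuel (s - 1)
          = pvF (PySem.List.slice e (some 0) (some s) ++
              ("factorial(".toList ++ PySem.List.slice e (some s) (some i) ++ [')']) ++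
              PySem.List.slice e (some (i + 1)) none) (s - 1)
            ++ (PySem.List.slice e (some 0) (some s) ++
              ("factorial(".toList ++ PySem.List.slice e (some s) (some i) ++ [')']) ++
              PySem.List.slice e (some (i + 1)) none).drop s.toNat) :
    pvLoopA (PySem.List.slice e (some 0) (some s) ++
            ("factorial(".toList ++ PySem.List.slice e (some s) (some i) ++ [')']) ++
            PySem.List.slice e (some (i + 1)) none) fuel (s - 1)
      = pvF e i ++ e.drop (i + 1).toNat := by
  set repl := "factorial(".toList ++ PySem.List.slice e (some s) (some i) ++ [')'] with hrepl
  have hsl : PySem.List.slice e (some 0) (some s) = e.take s.toNat := by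
    rw [pvSlice_eq e 0 s (by omega) hs0]
    simp
  have hlen : (e.take s.toNat).length = s.toNat := by
    rw [List.length_take]
    omega
  have hdrop : (PySem.List.slice e (some 0) (some s) ++ repl ++
      PySem.List.slice e (some (i + 1)) none).drop s.toNat
        = repl ++ e.drop (i + 1).toNat := by
    rw [hsl, PySem.List.slice_from e (by omega : (0:Int) ≤ i + 1), List.append_assoc,
        List.drop_left' hlen]
  have htake : (PySem.List.slice e (some 0) (some s) ++ repl ++
      PySem.List.slice e (some (i + 1)) none).take s.toNat = e.take s.toNat := by
    rw [hsl, List.append_assoc, List.take_left' hlen]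
  have hFcongr : pvF (PySem.List.slice e (some 0) (some s) ++ repl ++
      PySem.List.slice e (some (i + 1)) none) (s - 1) = pvF e (s - 1) := by
    unfold pvF
    rw [pvLoopB_congr _ e s.toNat htake (s - 1 + 1).toNat (s - 1) [] (by omega)]
  rw [IH, hdrop, hFcongr, pvF_step_some e i s (by omega) hc hos, ← hrepl]
  simp [List.append_assoc]

-- step + induction hypothesis packaged for the three operand branches
theorem pvBranchIH (n : Nat)
    (ihn : ∀ (e : List Char) (i : Int), (i + 1).toNat ≤ n → i < (e.length : Int) →
      pvLoopA e n i = pvF e i ++ e.drop (i + 1).toNat)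
    (e : List Char) (i s : Int) (hi0 : 0 ≤ i) (hil : i < (e.length : Int))
    (hs0 : 0 ≤ s) (hs : s ≤ i - 1) (hin : i ≤ (n : Int))
    (hc : pvGet e i = '!') (hos : pvOperandStart e i = some s) :
    pvLoopA (PySem.List.slice e (some 0) (some s) ++
            ("factorial(".toList ++ PySem.List.slice e (some s) (some i) ++ [')']) ++
            PySem.List.slice e (some (i + 1)) none) n (s - 1)
      = pvF e i ++ e.drop (i + 1).toNat := by
  apply pvStep e i s n hi0 hil hs0 hs hc hos
  have hlen2 : s - 1 < (((PySem.List.slice e (some 0) (some s) ++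
      ("factorial(".toList ++ PySem.List.slice e (some s) (some i) ++ [')']) ++
      PySem.List.slice e (some (i + 1)) none).length : Nat) : Int) := by
    simp only [List.length_append]
    rw [pvSlice_eq e 0 s (by omega) (by omega)]
    simp only [List.length_drop, List.length_take]
    omega
  have hres := ihn _ (s - 1) (by omega) hlen2
  rwa [show (s - 1 + 1).toNat = s.toNat by omega] at hres

-- the main invariant: A's in-place loop = B's emitted output plus the untouched suffix
theorem pvMain : ∀ (fuel : Nat) (e : List Char) (i : Int), (i + 1).toNat ≤ fuel →
    i < (e.length : Int) → pvLoopA e fuel i = pvF e i ++ e.drop (i + 1).toNat := by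
  intro fuel
  induction fuel with
  | zero =>
      intro e i hn hil
      have h0 : i < 0 := by omega
      rw [pvF_neg e i h0, show (i + 1).toNat = 0 by omega]
      rfl
  | succ n ihn =>
      intro e i hn hil
      by_cases h0 : i < 0
      · rw [pvLoopA, if_pos h0, pvF_neg e i h0, show (i + 1).toNat = 0 by omega]
        simp
      · have hi0 : 0 ≤ i := by omega
        have hdrop : e.drop i.toNat = pvGet e i :: e.drop (i + 1).toNat := by
          rw [pvGet_eq e i hi0 hil, List.drop_eq_getElem_cons (by omega : i.toNat < e.length),
              show i.toNat + 1 = (i + 1).toNat by omega]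
        have hih : pvLoopA e n (i - 1) = pvF e (i - 1) ++ e.drop i.toNat := by
          have := ihn e (i - 1) (by omega) (by omega)
          rwa [show (i - 1 + 1).toNat = i.toNat by omega] at this
        by_cases hc : pvGet e i = '!'
        · rw [pvLoopA, if_neg h0, if_neg (by simp [hc])]
          by_cases hp : 0 ≤ i - 1 ∧ pvGet e (i - 1) = ')'
          · rw [if_pos hp]
            have hge := pvParenScan_ge e (i - 1).toNat (i - 1 - 1) 1 (by omega)
            have hle := pvParenScan_le e (i - 1).toNat (i - 1 - 1) 1
            have hos : pvOperandStart e i = some (pvParenScan e (i - 1).toNat (i - 1 - 1) 1 + 1) := by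
              unfold pvOperandStart
              rw [if_neg (by omega), if_pos hp.2]
            exact pvBranchIH n ihn e i _ hi0 hil (by omega) (by omega) (by omega) hc hos
          · rw [if_neg hp]
            by_cases hd : 0 ≤ i - 1 ∧ pvDigitDot (pvGet e (i - 1))
            · rw [if_pos hd]
              have hle := pvRunScan_le pvDigitDot e (i - 1).toNat (i - 1)
              have hge := pvRunScan_nonneg pvDigitDot e (i - 1).toNat (i - 1) (by omega)
              have hos : pvOperandStart e i = some (pvRunScan pvDigitDot e (i - 1).toNat (i - 1)) := by
                unfold pvOperandStart
                rw [if_neg (by omega), if_neg (by intro hpp; exact hp ⟨hd.1, hpp⟩), if_pos hd.2]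
              exact pvBranchIH n ihn e i _ hi0 hil (by omega) (by omega) (by omega) hc hos
            · rw [if_neg hd]
              by_cases ha : 0 ≤ i - 1 ∧ pvAlphaPi (pvGet e (i - 1))
              · rw [if_pos ha]
                have hle := pvRunScan_le pvAlphaPi e (i - 1).toNat (i - 1)
                have hge := pvRunScan_nonneg pvAlphaPi e (i - 1).toNat (i - 1) (by omega)
                have hos : pvOperandStart e i = some (pvRunScan pvAlphaPi e (i - 1).toNat (i - 1)) := by
                  unfold pvOperandStart
                  rw [if_neg (by omega), if_neg (by intro hpp; exact hp ⟨ha.1, hpp⟩),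
                      if_neg (by intro hdd; exact hd ⟨ha.1, hdd⟩), if_pos ha.2]
                exact pvBranchIH n ihn e i _ hi0 hil (by omega) (by omega) (by omega) hc hos
              · rw [if_neg ha]
                have hos : pvOperandStart e i = none := by
                  unfold pvOperandStart
                  by_cases hj : i - 1 < 0
                  · rw [if_pos hj]
                  · rw [if_neg hj, if_neg (by intro hpp; exact hp ⟨by omega, hpp⟩),
                        if_neg (by intro hdd; exact hd ⟨by omega, hdd⟩),
                        if_neg (by intro haa; exact ha ⟨by omega, haa⟩)]
                rw [hih, hdrop, pvF_step_none e i (by omega) hc hos, hc]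
                simp
        · rw [pvLoopA, if_neg h0, if_pos (by simp [hc]), hih, hdrop,
              pvF_step_char e i (by omega) hc]
          simp

-- ===== VERDICT (by name: the statement is the Claim_ definition above) =====
theorem replace_factorial_py_spec : Claim_equal_replace_factorial_py := by
  intro expr _
  unfold Spec_replace_factorial_py replace_factorial_py replace_factorial_py_alt
  have h := pvMain expr.toList.length expr.toList ((expr.toList.length : Int) - 1)
    (by omega) (by omega)
  rw [h, show ((expr.toList.length : Int) - 1 + 1).toNat = expr.toList.length by omega]
  unfold pvF
  rw [show (((expr.toList.length : Int) - 1) + 1).toNat = expr.toList.length by omega]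
  simp
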